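-- pv_equiv track=rewrite | github.com/aflynt/aoc | day_23/d23.py | extend_grid
-- ===== SOURCE A (Python) =====
-- def extend_grid(grid):
--     nr = len(grid)
--     nc = len(grid[0])
--     newgrid = []
--
--     for i in range(nr*3):
--         rowchars = []
--         for j in range(nc*3):
--             rowchars.append('.')
--         newgrid.append(rowchars)
--
--     for i in range(nr):
--         irow = i + nr
--         for j in range(nc):
--             jcol = j + nc
--             val = grid[i][j]
--             newgrid[irow][jcol] = val
--
--     return newgrid
-- ===== SOURCE B (Python) =====
-- def extend_grid(grid):
--     nr = len(grid)
--     nc = len(grid[0])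
--     blank = [['.'] * nc for _ in range(nr)]
--     center = [list(row[:nc]) for row in grid]
--     layout = [(blank, blank, blank),
--               (blank, center, blank),
--               (blank, blank, blank)]
--     out = []
--     for left, mid, right in layout:
--         for l, m, r in zip(left, mid, right):
--             out.append(l + m + r)
--     return out
-- ===== Notes on version B (the rewrite author's own statement) =====
-- stated objective: alternative
-- what changed: Treats the result as a 3x3 block matrix (blank block / center block), emitting output rows by zipping blocks horizontally band by band, instead of allocating a full dotted 3nr x 3nc grid and then overwriting the centre cell-by-cell in a second nested index loop.
import Mathlib
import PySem

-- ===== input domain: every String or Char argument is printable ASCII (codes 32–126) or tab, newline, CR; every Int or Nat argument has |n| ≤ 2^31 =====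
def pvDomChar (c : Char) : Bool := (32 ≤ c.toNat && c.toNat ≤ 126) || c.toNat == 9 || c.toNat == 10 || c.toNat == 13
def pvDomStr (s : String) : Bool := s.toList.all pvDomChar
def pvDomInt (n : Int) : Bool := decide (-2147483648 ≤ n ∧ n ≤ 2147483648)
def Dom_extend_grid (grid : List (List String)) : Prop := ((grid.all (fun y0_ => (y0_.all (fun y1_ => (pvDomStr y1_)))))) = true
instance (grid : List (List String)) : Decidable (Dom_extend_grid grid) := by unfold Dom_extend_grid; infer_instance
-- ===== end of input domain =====

-- B views the result as a 3x3 block matrix (blank/center blocks) and emits rows by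
-- zipping blocks horizontally band by band, instead of allocating a dotted 3nr×3nc
-- grid and overwriting the centre cell-by-cell (objective: alternative).

-- ===== PORT A =====
-- literal port: allocate a (3nr)×(3nc) grid of ".", then overwrite the centre
-- block cell-by-cell (List.set plays the role of Python's in-place assignment).
def extend_grid (grid : List (List String)) : List (List String) :=
  let nr : Nat := grid.length
  let nc : Nat := (grid.headD []).length
  let newgrid : List (List String) :=
    (List.range (nr * 3)).map (fun _ => (List.range (nc * 3)).map (fun _ => "."))
  (List.range nr).foldl (fun ng i =>
    (List.range nc).foldl (fun ng j =>
      ng.set (i + nr) ((ng.getD (i + nr) []).set (j + nc) ((grid.getD i []).getD j "."))) ng)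
    newgrid

-- ===== PORT B =====
-- Python's zip of three lists is ported as zipWith over a pairing zip (both stop
-- at the shortest list, exactly like zip).
def extend_grid_alt (grid : List (List String)) : List (List String) :=
  let nr : Nat := grid.length
  let nc : Nat := (grid.headD []).length
  let blank : List (List String) := (List.range nr).map (fun _ => List.replicate nc ".")
  let center : List (List String) := grid.map (fun row => row.take nc)
  let layout := [(blank, blank, blank), (blank, center, blank), (blank, blank, blank)]
  layout.foldl (fun out band =>
    (List.zipWith (fun l (mr : List String × List String) => l ++ mr.1 ++ mr.2)
      band.1 (band.2.1.zip band.2.2)).foldl (fun o r => o ++ [r]) out) []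

-- ===== PRECONDITION & SPEC =====
-- Pre_ excludes exactly the inputs on which A raises IndexError: the empty grid
-- (grid[0]) and ragged grids having a row shorter than row 0 (grid[i][j]).
def Pre_extend_grid (grid : List (List String)) : Prop :=
  grid ≠ [] ∧ ∀ row ∈ grid, (grid.headD []).length ≤ row.length
instance (grid : List (List String)) : Decidable (Pre_extend_grid grid) := by
  unfold Pre_extend_grid; infer_instance

def pvWitness_extend_grid : List (List String) := [["a", "b"], ["c", "d"]]

def Spec_extend_grid (grid : List (List String)) (out : List (List String)) : Prop := out = extend_grid_alt grid
instance (grid : List (List String)) (out : List (List String)) : Decidable (Spec_extend_grid grid out) := by unfold Spec_extend_grid; infer_instance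

-- ===== CLAIM (what is proved, stated in full; the proofs are below) =====
def Claim_equal_extend_grid : Prop := ∀ (grid : List (List String)), Dom_extend_grid grid → Pre_extend_grid grid → Spec_extend_grid grid (extend_grid grid)

-- ===== LEMMAS AND PROOFS =====

-- the inner loop sets into one fixed row r: it equals a single set of row r
-- to the fold over that row.
theorem inner_fold_set (v : Nat → String) (nc : Nat) :
    ∀ (js : List Nat) (ng : List (List String)) (r : Nat), r < ng.length →
      js.foldl (fun g j => g.set r ((g.getD r []).set (j + nc) (v j))) ng
        = ng.set r (js.foldl (fun b j => b.set (j + nc) (v j)) (ng.getD r [])) := by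
  intro js
  induction js with
  | nil => intro ng r h; simp [List.getD_eq_getElem?_getD, List.getElem?_eq_getElem h]
  | cons j rest ih =>
    intro ng r h
    simp only [List.foldl_cons]
    rw [ih (ng.set r ((ng.getD r []).set (j + nc) (v j))) r (by simpa using h)]
    simp [List.getD_eq_getElem?_getD, h, List.set_set]

theorem row_fold_aux (v : Nat → String) (nc : Nat) :
    ∀ n, n ≤ nc * 2 →
      (List.range n).foldl (fun b j => b.set (j + nc) (v j)) (List.replicate (nc * 3) ".")
        = List.replicate nc "." ++ (List.range n).map v ++ List.replicate (nc * 2 - n) "." := by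
  intro n
  induction n with
  | zero =>
    intro _
    rw [show nc * 3 = nc + nc * 2 by ring, List.replicate_add]
    simp
  | succ n ih =>
    intro h
    have hn : n ≤ nc * 2 := Nat.le_of_succ_le h
    rw [List.range_succ, List.foldl_append, ih hn]
    simp only [List.foldl_cons, List.foldl_nil]
    have hlen : (List.replicate nc "." ++ (List.range n).map v).length = nc + n := by simp
    rw [List.set_append_right _ _ (by omega)]
    rw [hlen, show n + nc - (nc + n) = 0 by omega]
    rw [show nc * 2 - n = (nc * 2 - (n+1)) + 1 by omega, List.replicate_succ, List.set_cons_zero]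
    simp

-- the row produced by the inner loop on a blank row
theorem row_fold_blank (v : Nat → String) (nc : Nat) :
    (List.range nc).foldl (fun b j => b.set (j + nc) (v j)) (List.replicate (nc * 3) ".")
      = List.replicate nc "." ++ (List.range nc).map v ++ List.replicate nc "." := by
  rw [row_fold_aux v nc nc (by omega)]
  congr 2
  omega

theorem take_eq_map_range (row : List String) (nc : Nat) (h : nc ≤ row.length) :
    (List.range nc).map (fun j => row.getD j ".") = row.take nc := by
  apply List.ext_getElem
  · simp [Nat.min_eq_left h]
  · intro i h1 h2
    have hi : i < nc := by simpa using h1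
    simp [List.getElem_take, List.getD_eq_getElem?_getD,
      List.getElem?_eq_getElem (show i < row.length by omega)]

-- the outer loop, characterised: after m steps the first m centre rows are built.
theorem outer_fold (grid : List (List String)) (nc : Nat)
    (hrows : ∀ row ∈ grid, nc ≤ row.length) :
    ∀ m, m ≤ grid.length →
      (List.range m).foldl (fun ng i =>
          (List.range nc).foldl (fun ng j =>
            ng.set (i + grid.length)
              ((ng.getD (i + grid.length) []).set (j + nc) ((grid.getD i []).getD j "."))) ng)
        (List.replicate (grid.length * 3) (List.replicate (nc * 3) "."))
      = List.replicate grid.length (List.replicate (nc * 3) ".")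
        ++ (grid.take m).map (fun row => List.replicate nc "." ++ row.take nc ++ List.replicate nc ".")
        ++ List.replicate (grid.length * 2 - m) (List.replicate (nc * 3) ".") := by
  intro m
  set nr := grid.length with hnr
  set blank : List String := List.replicate (nc * 3) "." with hblank
  set midrow : List String → List String :=
    fun row => List.replicate nc "." ++ row.take nc ++ List.replicate nc "." with hmid
  induction m with
  | zero =>
    intro _
    rw [show nr * 3 = nr + nr * 2 by ring, List.replicate_add]
    simp
  | succ m ih =>
    intro h
    have hm : m ≤ nr := Nat.le_of_succ_le h
    have hmlt : m < nr := h
    have hm' : m ≤ grid.length := hm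
    rw [List.range_succ, List.foldl_append, ih hm]
    simp only [List.foldl_cons, List.foldl_nil]
    set g : List (List String) :=
      List.replicate nr blank ++ (grid.take m).map midrow ++ List.replicate (nr * 2 - m) blank
      with hg
    have hpre : (List.replicate nr blank ++ (grid.take m).map midrow).length = nr + m := by
      simp [Nat.min_eq_left hm']
    have hglen : g.length = nr * 3 := by
      simp only [hg, List.length_append, hpre]
      simp
      omega
    have hr : m + nr < g.length := by omega
    rw [inner_fold_set _ nc _ g (m + nr) hr]
    have hgetg : g.getD (m + nr) [] = blank := by
      rw [hg, List.getD_eq_getElem?_getD,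
        List.getElem?_append_right (by rw [hpre]; omega)]
      rw [hpre, List.getElem?_replicate]
      have : m + nr - (nr + m) < nr * 2 - m := by omega
      simp [this]
    rw [hgetg, hblank, row_fold_blank]
    have hgm : grid.getD m [] = grid[m] := List.getD_eq_getElem _ _ hmlt
    rw [hgm, take_eq_map_range grid[m] nc (hrows _ (List.getElem_mem hmlt))]
    rw [hg,
      List.set_append_right _ _ (by rw [hpre]; omega)]
    rw [hpre, show m + nr - (nr + m) = 0 by omega]
    rw [show nr * 2 - m = (nr * 2 - (m+1)) + 1 by omega, List.replicate_succ, List.set_cons_zero]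
    rw [List.take_add_one, List.getElem?_eq_getElem hmlt]
    simp [hmid, hblank]
    rw [List.take_add_one, List.getElem?_map, List.getElem?_eq_getElem hmlt]
    simp

-- appending one row at a time is appending the whole list
theorem foldl_append_singleton {α : Type} :
    ∀ (l acc : List α), l.foldl (fun o r => o ++ [r]) acc = acc ++ l := by
  intro l
  induction l with
  | nil => simp
  | cons x xs ih => intro acc; simp [ih, List.append_assoc]

-- zipping a list of rows against two constant (replicate) sides is a map
theorem zipWith_replicate_sides (p q : List String) :
    ∀ (xs : List (List String)),
      List.zipWith (fun l (mr : List String × List String) => l ++ mr.1 ++ mr.2)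
        (List.replicate xs.length p) (xs.zip (List.replicate xs.length q))
      = xs.map (fun x => p ++ x ++ q) := by
  intro xs
  induction xs with
  | nil => simp
  | cons x t ih =>
    simp only [List.replicate_succ, List.zip_cons_cons, List.zipWith_cons_cons, List.map_cons]
    exact congrArg _ ih

-- a fully blank band is a replicate of fully blank rows
theorem zipWith_all_blank (nc : Nat) :
    ∀ n, List.zipWith (fun l (mr : List String × List String) => l ++ mr.1 ++ mr.2)
        (List.replicate n (List.replicate nc "."))
        ((List.replicate n (List.replicate nc ".")).zip (List.replicate n (List.replicate nc ".")))
      = List.replicate n (List.replicate (nc * 3) ".") := by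
  intro n
  induction n with
  | zero => simp
  | succ n ih =>
    simp only [List.replicate_succ, List.zip_cons_cons, List.zipWith_cons_cons, ih]
    congr 1
    rw [show nc * 3 = nc + (nc + nc) by ring, List.replicate_add, List.replicate_add]
    simp
    omega

-- B's tiling, characterised in the same normal form as A's loops
theorem alt_eq (grid : List (List String)) :
    extend_grid_alt grid
      = List.replicate grid.length (List.replicate ((grid.headD []).length * 3) ".")
        ++ grid.map (fun row =>
            List.replicate (grid.headD []).length "." ++ row.take (grid.headD []).length
              ++ List.replicate (grid.headD []).length ".")
        ++ List.replicate grid.length (List.replicate ((grid.headD []).length * 3) ".") := by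
  unfold extend_grid_alt
  simp only [List.foldl_cons, List.foldl_nil]
  set nc := (grid.headD []).length with hnc
  have hblank : (List.range grid.length).map (fun _ => List.replicate nc ".")
      = List.replicate grid.length (List.replicate nc ".") := by simp [List.map_const']
  simp only [hblank]
  have hcenlen : (grid.map (fun row => row.take nc)).length = grid.length := by simp
  rw [foldl_append_singleton, foldl_append_singleton, foldl_append_singleton]
  rw [zipWith_all_blank nc grid.length]
  conv_lhs =>
    rw [show List.replicate grid.length (List.replicate nc ".")
          = List.replicate (grid.map (fun row => row.take nc)).length (List.replicate nc ".") by
        rw [hcenlen]]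
  rw [zipWith_replicate_sides]
  simp [List.append_assoc]

theorem extend_grid_spec : Claim_equal_extend_grid := by
  intro grid _ hpre
  obtain ⟨hne, hrows⟩ := hpre
  unfold Spec_extend_grid
  rw [alt_eq]
  unfold extend_grid
  have hinit : (List.range (grid.length * 3)).map
      (fun _ => (List.range ((grid.headD []).length * 3)).map (fun _ => "."))
      = List.replicate (grid.length * 3) (List.replicate ((grid.headD []).length * 3) ".") := by
    simp [List.map_const']
  simp only [hinit]
  rw [outer_fold grid (grid.headD []).length hrows grid.length (le_refl _)]
  rw [List.take_of_length_le (le_refl _)]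
  rw [show grid.length * 2 - grid.length = grid.length by omega]
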